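-- pv_equiv track=rewrite | github.com/jddjk/Baekjoon_Online_Judge_Solutions | 12767.py | push_function
-- ===== SOURCE A (Python) =====
-- def push_function(a, b):
--     if len(a) != len(b):
--         return False
--     if len(a) <= 1:
--         return True
--
--     al, ar, bl, br = [], [], [], []
--     for i in range(1, len(a)):
--         (al if a[i] < a[0] else ar).append(a[i])
--         (bl if b[i] < b[0] else br).append(b[i])
--
--     return push_function(al, bl) and push_function(ar, br)
-- ===== SOURCE B (Python) =====
-- def push_function(a, b):
--     if len(a) != len(b):
--         return False
--     return _shape(_build(a)) == _shape(_build(b))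
--
--
-- def _build(seq):
--     # Build the BST by inserting each element in order (duplicates go right).
--     root = None
--     for x in seq:
--         if root is None:
--             root = [x, None, None]
--             continue
--         cur = root
--         while True:
--             i = 1 if x < cur[0] else 2
--             if cur[i] is None:
--                 cur[i] = [x, None, None]
--                 break
--             cur = cur[i]
--     return root
--
--
-- def _shape(t):
--     # Value-free structure of the tree, for comparison.
--     if t is None:
--         return None
--     return (_shape(t[1]), _shape(t[2]))
-- ===== Notes on version B (the rewrite author's own statement) =====
-- stated objective: alternative
-- what changed: A recursively partitions both sequences around their first elements in lockstep; B instead builds each sequence's BST once by iterative insertion and compares the two value-free shapes.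
import Mathlib
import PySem

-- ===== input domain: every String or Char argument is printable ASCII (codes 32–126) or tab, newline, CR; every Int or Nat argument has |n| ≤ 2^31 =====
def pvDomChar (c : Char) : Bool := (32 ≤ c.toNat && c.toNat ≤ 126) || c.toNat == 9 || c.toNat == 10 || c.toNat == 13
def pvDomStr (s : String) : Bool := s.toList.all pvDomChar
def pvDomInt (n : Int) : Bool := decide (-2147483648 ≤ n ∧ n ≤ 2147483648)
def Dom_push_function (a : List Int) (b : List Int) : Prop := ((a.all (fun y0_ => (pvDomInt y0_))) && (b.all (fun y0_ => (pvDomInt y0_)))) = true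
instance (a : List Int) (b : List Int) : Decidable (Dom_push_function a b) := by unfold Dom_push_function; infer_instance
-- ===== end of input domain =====

-- B re-implements A by building each sequence's BST by insertion and comparing the two
-- value-free shapes once; same return value, different algorithm (objective: alternative).

-- ===== PORT A =====
-- '(al if x < x0 else ar).append(x)' for root value x0
def pvAStepV (x0 : Int) (p : List Int × List Int) (x : Int) : List Int × List Int :=
  if x < x0 then (p.1 ++ [x], p.2) else (p.1, p.2 ++ [x])

-- one loop step of A's partition loop for one of the two sequences xs
def pvAStep (xs : List Int) (p : List Int × List Int) (i : Int) : List Int × List Int :=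
  pvAStepV (PySem.List.pyGetD xs 0 0) p (PySem.List.pyGetD xs i 0)

-- A's 'for i in range(1, len(a))' loop, carrying ((al, ar), (bl, br))
def pvALoop (a b : List Int) : (List Int × List Int) × (List Int × List Int) :=
  (PySem.List.pyRange 1 (a.length : Int) 1).foldl
    (fun st i => (pvAStep a st.1 i, pvAStep b st.2 i)) (([], []), ([], []))

-- loop characterisations, needed by push_function's decreasing_by
lemma pvFoldl_stepV (x0 : Int) (l : List Int) : ∀ (p q : List Int),
    l.foldl (pvAStepV x0) (p, q) =
      (p ++ l.filter (fun x => decide (x < x0)), q ++ l.filter (fun x => !decide (x < x0))) := by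
  induction l with
  | nil => intro p q; simp
  | cons x xs ih =>
    intro p q
    by_cases h : x < x0 <;> simp [pvAStepV, h, ih, List.append_assoc]

lemma pvSide_char (xs : List Int) :
    (PySem.List.pyRange 1 (xs.length : Int) 1).foldl (pvAStep xs) ([], []) =
      ((xs.drop 1).filter (fun x => decide (x < PySem.List.pyGetD xs 0 0)),
       (xs.drop 1).filter (fun x => !decide (x < PySem.List.pyGetD xs 0 0))) := by
  have h : (PySem.List.pyRange 1 (xs.length : Int) 1).foldl (pvAStep xs) ([], []) =
      (xs.drop (1 : Int).toNat).foldl (pvAStepV (PySem.List.pyGetD xs 0 0)) ([], []) :=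
    PySem.List.foldl_pyRange_pyGetD' (a := 1) (xs := xs) (d := 0)
      (f := pvAStepV (PySem.List.pyGetD xs 0 0)) (init := ([], [])) (by norm_num)
  rw [h, pvFoldl_stepV]
  simp

lemma pvALoop_char (a b : List Int) (h : b.length = a.length) :
    pvALoop a b =
      (((a.drop 1).filter (fun x => decide (x < PySem.List.pyGetD a 0 0)),
        (a.drop 1).filter (fun x => !decide (x < PySem.List.pyGetD a 0 0))),
       ((b.drop 1).filter (fun x => decide (x < PySem.List.pyGetD b 0 0)),
        (b.drop 1).filter (fun x => !decide (x < PySem.List.pyGetD b 0 0)))) := by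
  unfold pvALoop
  rw [PySem.List.foldl_prod_mk (f := pvAStep a) (g := pvAStep b)]
  rw [pvSide_char a, ← h, pvSide_char b]

def push_function (a : List Int) (b : List Int) : Bool :=
  if a.length ≠ b.length then false
  else if a.length ≤ 1 then true
  else
    let s := pvALoop a b
    push_function s.1.1 s.2.1 && push_function s.1.2 s.2.2
termination_by a.length
decreasing_by
  · rw [pvALoop_char a b (by omega)]
    simpa using Nat.lt_of_le_of_lt (List.length_filter_le _ _) (by simp; omega)
  · rw [pvALoop_char a b (by omega)]
    simpa using Nat.lt_of_le_of_lt (List.length_filter_le _ _) (by simp; omega)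

-- ===== PORT B =====
inductive PvTree : Type
  | leaf : PvTree
  | node : Int → PvTree → PvTree → PvTree
deriving DecidableEq, Repr

-- BST insertion, duplicates to the right (Source B's while loop, as structural recursion)
def pvInsert (x : Int) : PvTree → PvTree
  | .leaf => .node x .leaf .leaf
  | .node v l r => if x < v then .node v (pvInsert x l) r else .node v l (pvInsert x r)

def pvBuild (s : List Int) : PvTree := s.foldl (fun t x => pvInsert x t) .leaf

inductive PvShape : Type
  | leaf : PvShape
  | node : PvShape → PvShape → PvShape
deriving DecidableEq, Repr

def pvShape : PvTree → PvShape
  | .leaf => .leaf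
  | .node _ l r => .node (pvShape l) (pvShape r)

def push_function_alt (a : List Int) (b : List Int) : Bool :=
  if a.length ≠ b.length then false
  else pvShape (pvBuild a) == pvShape (pvBuild b)

-- ===== PRECONDITION & SPEC =====
def Spec_push_function (a : List Int) (b : List Int) (out : Bool) : Prop := out = push_function_alt a b
instance (a : List Int) (b : List Int) (out : Bool) : Decidable (Spec_push_function a b out) := by unfold Spec_push_function; infer_instance

-- ===== CLAIM (what is proved, stated in full; the proofs are below) =====
def Claim_equal_push_function : Prop := ∀ (a : List Int) (b : List Int), Dom_push_function a b → Spec_push_function a b (push_function a b)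

-- ===== LEMMAS AND PROOFS =====

-- inserting a list into a node distributes onto the subtrees
lemma pvFoldl_insert_node (l : List Int) : ∀ (v : Int) (L R : PvTree),
    l.foldl (fun t x => pvInsert x t) (.node v L R) =
      .node v ((l.filter (fun x => decide (x < v))).foldl (fun t x => pvInsert x t) L)
              ((l.filter (fun x => !decide (x < v))).foldl (fun t x => pvInsert x t) R) := by
  induction l with
  | nil => intro v L R; simp
  | cons x xs ih =>
    intro v L R
    by_cases h : x < v <;> simp [pvInsert, h, ih]

lemma pvBuild_cons (x : Int) (l : List Int) :
    pvBuild (x :: l) =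
      .node x (pvBuild (l.filter (fun y => decide (y < x))))
              (pvBuild (l.filter (fun y => !decide (y < x)))) := by
  simp [pvBuild, List.foldl_cons, pvInsert, pvFoldl_insert_node]

def pvSSize : PvShape → Nat
  | .leaf => 0
  | .node l r => pvSSize l + pvSSize r + 1

lemma pvSSize_insert (x : Int) (t : PvTree) :
    pvSSize (pvShape (pvInsert x t)) = pvSSize (pvShape t) + 1 := by
  induction t with
  | leaf => simp [pvInsert, pvShape, pvSSize]
  | node v l r ihl ihr =>
    by_cases h : x < v <;> simp [pvInsert, h, pvShape, pvSSize, ihl, ihr] <;> omega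

lemma pvSSize_foldl (l : List Int) : ∀ (t : PvTree),
    pvSSize (pvShape (l.foldl (fun t x => pvInsert x t) t)) = pvSSize (pvShape t) + l.length := by
  induction l with
  | nil => intro t; simp
  | cons x xs ih => intro t; simp [ih, pvSSize_insert]; omega

lemma pvSSize_build (s : List Int) : pvSSize (pvShape (pvBuild s)) = s.length := by
  simp [pvBuild, pvSSize_foldl, pvShape, pvSSize]

-- the length test in B is subsumed by shape equality
lemma pvAlt_eq_shape (a b : List Int) :
    push_function_alt a b = (pvShape (pvBuild a) == pvShape (pvBuild b)) := by
  unfold push_function_alt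
  split_ifs with h
  · symm
    rw [beq_eq_false_iff_ne]
    intro heq
    apply h
    rw [← pvSSize_build a, ← pvSSize_build b, heq]
  · rfl

lemma pvGetD_zero_cons (x : Int) (l : List Int) : PySem.List.pyGetD (x :: l) 0 0 = x := by
  simp [PySem.List.pyGetD, PySem.List.pyGet?, PySem.List.pyIdx?]

lemma pvMain (n : Nat) : ∀ (a b : List Int), a.length ≤ n →
    push_function a b = push_function_alt a b := by
  induction n with
  | zero =>
    intro a b hn
    have ha : a = [] := List.eq_nil_of_length_eq_zero (by omega)
    subst ha
    rw [push_function, push_function_alt]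
    cases b <;> simp
  | succ n ih =>
    intro a b hn
    rw [push_function]
    by_cases hl : a.length ≠ b.length
    · rw [push_function_alt]; simp [hl]
    · have hlen : a.length = b.length := by omega
      by_cases h1 : a.length ≤ 1
      · -- lengths equal and ≤ 1: both true
        rw [if_neg hl, if_pos h1]
        cases a with
        | nil =>
          cases b with
          | nil => simp [push_function_alt, pvBuild, pvShape]
          | cons y ys => simp at hlen
        | cons x xs =>
          cases b with
          | nil => simp at hlen
          | cons y ys =>
            have hx : xs = [] := List.eq_nil_of_length_eq_zero
              (by simp only [List.length_cons] at h1; omega)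
            have hy : ys = [] := List.eq_nil_of_length_eq_zero
              (by simp only [List.length_cons] at h1 hlen; omega)
            subst hx; subst hy
            simp [push_function_alt, pvBuild, pvShape, pvInsert]
      · -- recursive case
        rw [if_neg hl, if_neg h1]
        cases a with
        | nil => simp at h1
        | cons a0 ta =>
          cases b with
          | nil => simp at hlen
          | cons b0 tb =>
            rw [pvALoop_char _ _ (by omega)]
            simp only [List.drop_succ_cons, List.drop_zero, pvGetD_zero_cons]
            have hta : ta.length ≤ n := by simp at hn; omega
            have hfl : (ta.filter (fun x => decide (x < a0))).length ≤ n :=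
              le_trans (List.length_filter_le _ _) hta
            have hfr : (ta.filter (fun x => !decide (x < a0))).length ≤ n :=
              le_trans (List.length_filter_le _ _) hta
            rw [ih _ _ hfl, ih _ _ hfr, pvAlt_eq_shape, pvAlt_eq_shape, pvAlt_eq_shape,
              pvBuild_cons a0 ta, pvBuild_cons b0 tb]
            rw [Bool.eq_iff_iff]
            simp only [Bool.and_eq_true, beq_iff_eq, pvShape, PvShape.node.injEq]

-- ===== VERDICT (by name: the statement is the Claim_ definition above) =====
theorem push_function_spec : Claim_equal_push_function := by
  intro a b _
  unfold Spec_push_function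
  exact pvMain a.length a b le_rfl
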